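-- pv_equiv track=rewrite | github.com/Ren-97/CodePath2025Summer | Unit2/section2_advanced1.py | organize_exhibition
-- ===== SOURCE A (Python) =====
-- import collections
--
-- def organize_exhibition(collection):
--     count = collections.Counter(collection)
--     max_freq = max(count.values())
--     res = [[] for _ in range(max_freq)]
--
--     row_index = 0
--     for item, count in count.items():
--         for _ in range(count):
--             res[row_index].append(item)
--             row_index = (row_index + 1) % max_freq
--     return res
-- ===== SOURCE B (Python) =====
-- import collections
--
-- def organize_exhibition(collection):
--     count = collections.Counter(collection)
--     max_freq = max(count.values())
--     flat = [item for item, c in count.items() for _ in range(c)]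
--     return [flat[r::max_freq] for r in range(max_freq)]
-- ===== Notes on version B (the rewrite author's own statement) =====
-- stated objective: simpler
-- what changed: Replaces the stateful round-robin loop (advancing row index with modulo, appending into preallocated rows) by building the flat item sequence once and carving each row out with a stride slice flat[r::max_freq].
import Mathlib
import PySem

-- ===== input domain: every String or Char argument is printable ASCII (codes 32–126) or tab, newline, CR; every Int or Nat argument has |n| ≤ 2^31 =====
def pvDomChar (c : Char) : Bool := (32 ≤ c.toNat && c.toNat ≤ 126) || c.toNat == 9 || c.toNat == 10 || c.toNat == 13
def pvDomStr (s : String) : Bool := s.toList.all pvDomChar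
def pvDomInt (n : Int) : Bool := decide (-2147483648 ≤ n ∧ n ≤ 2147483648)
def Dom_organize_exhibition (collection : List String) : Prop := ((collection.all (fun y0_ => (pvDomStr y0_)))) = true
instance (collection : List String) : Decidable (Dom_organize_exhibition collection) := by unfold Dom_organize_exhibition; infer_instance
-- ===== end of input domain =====

-- B replaces A's stateful round-robin loop (advancing modulo row index) by building the flat
-- item sequence once and carving each row out with a stride slice flat[r::max_freq] (simpler).

-- ===== PORT A =====
-- one round-robin step: append x to row row_index, advance the index modulo max_freq
def pvStepA (max_freq : Int) (s : List (List String) × Int) (x : String) : List (List String) × Int :=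
  (s.1.modify s.2.toNat (· ++ [x]), PySem.Int.mod (s.2 + 1) max_freq)

def organize_exhibition (collection : List String) : List (List String) :=
  let count := PySem.Dict.counter collection
  -- Python's max() raises ValueError on an empty collection; Pre_ excludes []; the .getD 0 default is never reached inside Pre_
  let max_freq : Int := (PySem.List.max? count.values (fun v => v)).getD 0
  let res : List (List String) := (PySem.List.pyRange 0 max_freq 1).map (fun _ => [])
  (count.items.foldl
    (fun s p => (PySem.List.pyRange 0 p.2 1).foldl (fun s' _ => pvStepA max_freq s' p.1) s)
    (res, 0)).1

-- ===== PORT B =====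
def organize_exhibition_alt (collection : List String) : List (List String) :=
  let count := PySem.Dict.counter collection
  -- same ValueError corner as A: excluded by Pre_
  let max_freq : Int := (PySem.List.max? count.values (fun v => v)).getD 0
  let flat := count.items.flatMap (fun p => (PySem.List.pyRange 0 p.2 1).map (fun _ => p.1))
  -- flat[r::max_freq]: slice? returns some whenever the step is nonzero, so the .getD [] default is never reached
  (PySem.List.pyRange 0 max_freq 1).map
    (fun r => (PySem.List.slice? flat (some r) none max_freq).getD [])

-- ===== PRECONDITION & SPEC =====
-- Pre_ excludes only the empty collection, on which A raises ValueError (max() of an empty sequence); B raises the same way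
def Pre_organize_exhibition (collection : List String) : Prop := collection ≠ []
instance (collection : List String) : Decidable (Pre_organize_exhibition collection) := by unfold Pre_organize_exhibition; infer_instance
def pvWitness_organize_exhibition : List String := ["a", "b", "a"]

def Spec_organize_exhibition (collection : List String) (out : List (List String)) : Prop := out = organize_exhibition_alt collection
instance (collection : List String) (out : List (List String)) : Decidable (Spec_organize_exhibition collection out) := by unfold Spec_organize_exhibition; infer_instance

-- ===== CLAIM (what is proved, stated in full; the proofs are below) =====
def Claim_equal_organize_exhibition : Prop := ∀ (collection : List String), Dom_organize_exhibition collection → Pre_organize_exhibition collection → Spec_organize_exhibition collection (organize_exhibition collection)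

-- ===== LEMMAS AND PROOFS =====

-- elements of l that A's loop, entered with row index j, deposits into row r
def pvPick (m : Nat) : Nat → List String → Nat → List String
  | _, [], _ => []
  | j, x :: xs, r => (if j = r then [x] else []) ++ pvPick m ((j + 1) % m) xs r

-- every m-th element, starting with the head
def pvEvery (m : Nat) : List String → List String
  | [] => []
  | x :: xs => x :: pvEvery m (xs.drop (m - 1))
termination_by l => l.length
decreasing_by simp

lemma pvEvery_nil (m : Nat) : pvEvery m [] = [] := by rw [pvEvery]

lemma pvEvery_cons (m : Nat) (x : String) (xs : List String) :
    pvEvery m (x :: xs) = x :: pvEvery m (xs.drop (m - 1)) := by rw [pvEvery]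

-- (j + 1) % m for j < m, without division
lemma pvModSucc (j m : Nat) (h : j < m) : (j + 1) % m = if j + 1 = m then 0 else j + 1 := by
  split
  · simp_all
  · exact Nat.mod_eq_of_lt (by omega)

lemma pvFmodEq (j m : Int) (h0 : 0 ≤ j) (h1 : j < m) :
    (j + 1).fmod m = if j + 1 = m then 0 else j + 1 := by
  rw [Int.fmod_eq_emod]
  have hm : (0:Int) ≤ m := by omega
  simp only [hm, true_or, if_true, add_zero]
  split
  · next h => rw [h, Int.emod_self]
  · exact Int.emod_eq_of_lt (by omega) (by omega)

lemma pvFmodSuccToNat (j m : Int) (h0 : 0 ≤ j) (h1 : j < m) :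
    ((j + 1).fmod m).toNat = (j.toNat + 1) % m.toNat := by
  rw [pvFmodEq j m h0 h1]
  split
  · next h =>
      have : j.toNat + 1 = m.toNat := by omega
      rw [this, Nat.mod_self]
      rfl
  · next h =>
      rw [Nat.mod_eq_of_lt (by omega)]
      omega

lemma pvFmodSucc_nonneg (j m : Int) (h0 : 0 ≤ j) (h1 : j < m) : 0 ≤ (j + 1).fmod m := by
  rw [pvFmodEq j m h0 h1]; split <;> omega

lemma pvFmodSucc_lt (j m : Int) (h0 : 0 ≤ j) (h1 : j < m) : (j + 1).fmod m < m := by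
  rw [pvFmodEq j m h0 h1]; split <;> omega

-- A's nested loop over (item, count) pairs is the flat fold over the flattened sequence
lemma pvNestedEqFlat (m : Int) (items : List (String × Int)) (init : List (List String) × Int) :
    items.foldl
      (fun s p => (PySem.List.pyRange 0 p.2 1).foldl (fun s' _ => pvStepA m s' p.1) s) init
    = (items.flatMap (fun p => (PySem.List.pyRange 0 p.2 1).map (fun _ => p.1))).foldl
        (pvStepA m) init := by
  induction items generalizing init with
  | nil => rfl
  | cons p rest ih =>
      simp only [List.foldl_cons, List.flatMap_cons, List.foldl_append, List.foldl_map]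
      exact ih _

-- the rows produced by A's flat fold
lemma pvLoopRows (m : Int) (_hm : 0 < m) (l : List String) :
    ∀ (res : List (List String)) (j : Int), 0 ≤ j → j < m → ∀ (r : Nat),
      (l.foldl (pvStepA m) (res, j)).1[r]? =
        (res[r]?).map (· ++ pvPick m.toNat j.toNat l r) := by
  induction l with
  | nil =>
      intro res j _ _ r
      simp [pvPick]
  | cons x xs ih =>
      intro res j h0 h1 r
      have hstep : pvStepA m (res, j) x
          = (res.modify j.toNat (· ++ [x]), (j + 1).fmod m) := rfl
      rw [List.foldl_cons, hstep,
        ih _ _ (pvFmodSucc_nonneg j m h0 h1) (pvFmodSucc_lt j m h0 h1) r,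
        pvFmodSuccToNat j m h0 h1]
      rw [List.getElem?_modify]
      cases hres : res[r]? with
      | none => rfl
      | some a =>
          simp only [Option.map_some, Option.map_eq_map, pvPick]
          by_cases hj : j.toNat = r <;> simp [hj, List.append_assoc]

-- pvPick in terms of pvEvery
lemma pvPickEqEvery (m : Nat) (hm : 0 < m) (l : List String) :
    ∀ (j r : Nat), j < m → r < m →
      pvPick m j l r = pvEvery m (l.drop ((r + m - j) % m)) := by
  induction l with
  | nil => intro j r _ _; simp [pvPick, pvEvery_nil]
  | cons x xs ih =>
      intro j r hj hr
      simp only [pvPick]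
      by_cases hjr : j = r
      · subst hjr
        have hd : (j + m - j) % m = 0 := by
          have h1 : j + m - j = m := by omega
          simp [h1]
        rw [hd, List.drop_zero, pvEvery_cons]
        have hrec := ih ((j + 1) % m) j (Nat.mod_lt _ hm) hj
        have harg : (j + m - (j + 1) % m) % m = m - 1 := by
          rw [pvModSucc j m hj]
          by_cases he : j + 1 = m
          · rw [if_pos he, Nat.sub_zero, Nat.add_mod_right, Nat.mod_eq_of_lt hj]
            omega
          · rw [if_neg he]
            have h4 : j + m - (j + 1) = m - 1 := by omega
            rw [h4, Nat.mod_eq_of_lt (by omega)]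
        rw [hrec, harg]
        simp
      · simp only [if_neg hjr, List.nil_append]
        have hrec := ih ((j + 1) % m) r (Nat.mod_lt _ hm) hr
        set d := (r + m - j) % m with hdd
        have hdval : d = if j < r then r - j else r + m - j := by
          rw [hdd]
          by_cases hlt : j < r
          · rw [if_pos hlt]
            have h5 : r + m - j = (r - j) + m := by omega
            rw [h5, Nat.add_mod_right, Nat.mod_eq_of_lt (by omega)]
          · rw [if_neg hlt, Nat.mod_eq_of_lt (by omega)]
        have hbounds : 1 ≤ d ∧ d < m := by rw [hdval]; split <;> omega
        have h3 : (r + m - (j + 1) % m) % m = d - 1 := by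
          rw [pvModSucc j m hj]
          by_cases he : j + 1 = m
          · rw [if_pos he, Nat.sub_zero, Nat.add_mod_right, Nat.mod_eq_of_lt hr, hdval]
            have hnl : ¬ j < r := by omega
            rw [if_neg hnl]
            omega
          · rw [if_neg he]
            by_cases hlt : j < r
            · have h5 : r + m - (j + 1) = (r - j - 1) + m := by omega
              rw [h5, Nat.add_mod_right, Nat.mod_eq_of_lt (by omega), hdval, if_pos hlt]
            · have h5 : r + m - (j + 1) < m := by omega
              rw [Nat.mod_eq_of_lt h5, hdval, if_neg hlt]
              omega
        rw [h3] at hrec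
        rw [hrec]
        have hd1 : d = (d - 1) + 1 := by omega
        conv_rhs => rw [hd1, List.drop_succ_cons]

-- the stride filterMap from slice? is pvEvery
lemma pvFilterMapStride (xs : List String) (m : Nat) (hm : 0 < m) :
    ∀ (c r : Nat), c = (if r < xs.length then (xs.length - r - 1) / m + 1 else 0) →
      (List.range c).filterMap (fun k => xs[r + m * k]?) = pvEvery m (xs.drop r) := by
  intro c
  induction c with
  | zero =>
      intro r hc
      have hle : xs.length ≤ r := by by_contra h; simp [Nat.not_le.mp h] at hc
      simp [List.drop_eq_nil_of_le hle, pvEvery_nil]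
  | succ c ih =>
      intro r hc
      have hr : r < xs.length := by by_contra h; simp [h] at hc
      have hc' : c = (xs.length - r - 1) / m := by rw [if_pos hr] at hc; omega
      rw [List.range_succ_eq_map]
      simp only [List.filterMap_cons, Nat.mul_zero, Nat.add_zero,
        List.getElem?_eq_getElem hr, List.filterMap_map]
      have hfe : ((fun k => xs[r + m * k]?) ∘ Nat.succ) = (fun k => xs[(r + m) + m * k]?) := by
        funext k
        simp only [Function.comp, Nat.succ_eq_add_one]
        congr 1
        ring
      rw [hfe]
      have hcnext : c = (if r + m < xs.length then (xs.length - (r + m) - 1) / m + 1 else 0) := by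
        rw [hc']
        by_cases hlt : r + m < xs.length
        · rw [if_pos hlt]
          have h5 : xs.length - r - 1 = (xs.length - (r + m) - 1) + m := by omega
          rw [h5, Nat.add_div_right _ hm]
        · rw [if_neg hlt]
          exact Nat.div_eq_of_lt (by omega)
      rw [ih _ hcnext, List.drop_eq_getElem_cons hr, pvEvery_cons, List.drop_drop]
      have h6 : r + 1 + (m - 1) = r + m := by omega
      rw [h6]

-- flat[r::m] is pvEvery m (flat.drop r)
lemma pvSliceStride (xs : List String) (m r : Nat) (hm : 0 < m) :
    PySem.List.slice? xs (some (r : Int)) none (m : Int) = some (pvEvery m (xs.drop r)) := by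
  simp only [PySem.List.slice?, PySem.List.sliceIndices]
  have h1 : ¬ ((m:Int) = 0) := by exact_mod_cast hm.ne'
  have h2 : ¬ ((m:Int) < 0) := by omega
  have h3 : ¬ ((r:Int) < 0) := by omega
  have h4 : (0:Int) < (m:Int) := by exact_mod_cast hm
  simp only [h1, h2, h3, h4, if_false, if_pos]
  by_cases hr : r < xs.length
  · have hmin : min ((r:Int)) (xs.length : Int) = (r:Int) := by omega
    rw [hmin]
    have hcond : ((r:Int)) < (xs.length : Int) := by exact_mod_cast hr
    rw [if_pos hcond]
    have hcnt : (((xs.length : Int) - r + m - 1) / m).toNat = (xs.length - r - 1) / m + 1 := by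
      have hne : (xs.length : Int) - r + m - 1 = ((xs.length - r - 1 + m : Nat) : Int) := by omega
      rw [hne, ← Int.natCast_div, Int.toNat_natCast, Nat.add_div_right _ hm]
    rw [hcnt]
    have hfix : (fun k : Nat => xs[((r:Int) + (m:Int) * (k:Int)).toNat]?) =
        (fun k : Nat => xs[r + m * k]?) := by
      funext k
      have hk : ((r:Int) + (m:Int) * (k:Int)).toNat = r + m * k := by omega
      rw [hk]
    rw [hfix, pvFilterMapStride xs m hm _ r (by rw [if_pos hr])]
  · have hmin : min ((r:Int)) (xs.length : Int) = (xs.length : Int) := by omega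
    rw [hmin]
    have hcond : ¬ ((xs.length : Int) < (xs.length : Int)) := by omega
    rw [if_neg hcond]
    simp [List.drop_eq_nil_of_le (show xs.length ≤ r by omega), pvEvery_nil]

-- on a nonempty collection max(count.values()) is some positive value
lemma pvMaxPos (collection : List String) (h : collection ≠ []) :
    ∃ mv : Int,
      PySem.List.max? (PySem.Dict.counter collection).values (fun v => v) = some mv ∧ 0 < mv := by
  have hkeys : (PySem.Dict.counter collection).keys ≠ [] := by
    intro hnil
    obtain ⟨c, cs, rfl⟩ := List.exists_cons_of_ne_nil h
    have hc : c ∈ (PySem.Dict.counter (c :: cs)).keys := by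
      rw [PySem.Dict.keys_counter]
      exact (PySem.Set.mem_ofList _ _).mpr (List.mem_cons_self)
    rw [hnil] at hc
    exact List.not_mem_nil hc
  have hvals : (PySem.Dict.counter collection).values ≠ [] := by
    intro hnil
    apply hkeys
    have hlen := congrArg List.length hnil
    simp only [PySem.Dict.values, List.length_map, List.length_nil] at hlen
    simp [PySem.Dict.keys, List.eq_nil_of_length_eq_zero, hlen]
  cases hmx : PySem.List.max? (PySem.Dict.counter collection).values (fun v => v) with
  | none => exact absurd ((PySem.List.max?_eq_none_iff _ _).mp hmx) hvals
  | some mv =>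
      refine ⟨mv, rfl, ?_⟩
      have hmem : mv ∈ (PySem.Dict.counter collection).values := PySem.List.max?_mem hmx
      obtain ⟨p, hp, hpv⟩ := List.mem_map.mp hmem
      have hget : (PySem.Dict.counter collection).get? p.1 = some mv := by
        apply PySem.Dict.get?_of_mem_items _ _ (PySem.Dict.nodup_keys_counter collection)
        rw [← hpv]
        exact hp
      have hgd : (PySem.Dict.counter collection).getD p.1 0 = mv := by
        rw [PySem.Dict.getD, hget, Option.getD_some]
      rw [PySem.Dict.getD_counter] at hgd
      have hkmem : p.1 ∈ collection := by
        have : p.1 ∈ (PySem.Dict.counter collection).keys := List.mem_map_of_mem hp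
        rw [PySem.Dict.keys_counter] at this
        exact (PySem.Set.mem_ofList _ _).mp this
      have hcnt : 0 < List.count p.1 collection := List.count_pos_iff.mpr hkmem
      omega

-- ===== VERDICT (by name: the statement is the Claim_ definition above) =====
theorem organize_exhibition_spec : Claim_equal_organize_exhibition := by
  intro collection _ hpre
  unfold Spec_organize_exhibition organize_exhibition organize_exhibition_alt
  obtain ⟨mv, hmax, hmv⟩ := pvMaxPos collection hpre
  simp only [hmax, Option.getD_some]
  set flat := (PySem.Dict.counter collection).items.flatMap
      (fun p => (PySem.List.pyRange 0 p.2 1).map (fun _ => p.1)) with hflat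
  rw [pvNestedEqFlat]
  apply List.ext_getElem?
  intro r
  rw [pvLoopRows mv hmv flat _ 0 le_rfl hmv r]
  rw [List.map_const', PySem.List.length_pyRange_one]
  have hmN : 0 < mv.toNat := by omega
  have hcast : ((mv.toNat : Int)) = mv := Int.toNat_of_nonneg hmv.le
  rw [PySem.List.pyRange_one]
  simp only [Int.sub_zero, Int.toNat_zero]
  by_cases hrm : r < mv.toNat
  · rw [List.getElem?_replicate, if_pos hrm, List.getElem?_map, List.getElem?_map,
      List.getElem?_range hrm]
    simp only [Option.map_some, List.nil_append, zero_add]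
    conv_rhs => rw [← hcast]
    rw [pvSliceStride flat mv.toNat r hmN, Option.getD_some,
      pvPickEqEvery mv.toNat hmN flat 0 r hmN hrm, Nat.sub_zero, Nat.add_mod_right,
      Nat.mod_eq_of_lt hrm]
  · rw [List.getElem?_replicate, if_neg hrm,
      List.getElem?_eq_none (by simp only [List.length_map, List.length_range]; omega)]
    rfl
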